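-- pv_equiv track=rewrite | github.com/megulus/code-challenges | calendar.py | countDaysInElapsedMonths
-- ===== SOURCE A (Python) =====
-- def isLeapYear(year):
--   if year % 4 == 0:
--     if year % 100 == 0:
--       if year % 400 == 0:
--         return True
--       else:
--         return False
--     else:
--       return True
--   return False
--
-- def countDaysInElapsedMonths(elapsedMonths, year):
--   count = 0
--   for i in range(elapsedMonths):
--     if i == 1:
--       if isLeapYear(year):
--         count += 29
--       else:
--         count += 28
--     elif i in [3, 5, 8, 10]:
--       count += 30
--     else:
--       count += 31
--   return count
-- ===== SOURCE B (Python) =====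
-- def isLeapYear(year):
--   if year % 4 == 0:
--     if year % 100 == 0:
--       if year % 400 == 0:
--         return True
--       else:
--         return False
--     else:
--       return True
--   return False
--
-- def countDaysInElapsedMonths(elapsedMonths, year):
--   if elapsedMonths <= 0:
--     return 0
--   # Start from 31 days for every month, then subtract the shortfall of the
--   # shorter months that have already elapsed.
--   short30 = sum(1 for i in (3, 5, 8, 10) if i < elapsedMonths)
--   feb = (2 if isLeapYear(year) else 3) if elapsedMonths >= 2 else 0
--   return 31 * elapsedMonths - short30 - feb
-- ===== Notes on version B (the rewrite author's own statement) =====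
-- stated objective: faster
-- what changed: Replaced A's per-index loop with branch tests by a closed form: 31 days per elapsed month minus one day for each elapsed 30-day month and the February shortfall, each computed once.
import Mathlib
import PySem

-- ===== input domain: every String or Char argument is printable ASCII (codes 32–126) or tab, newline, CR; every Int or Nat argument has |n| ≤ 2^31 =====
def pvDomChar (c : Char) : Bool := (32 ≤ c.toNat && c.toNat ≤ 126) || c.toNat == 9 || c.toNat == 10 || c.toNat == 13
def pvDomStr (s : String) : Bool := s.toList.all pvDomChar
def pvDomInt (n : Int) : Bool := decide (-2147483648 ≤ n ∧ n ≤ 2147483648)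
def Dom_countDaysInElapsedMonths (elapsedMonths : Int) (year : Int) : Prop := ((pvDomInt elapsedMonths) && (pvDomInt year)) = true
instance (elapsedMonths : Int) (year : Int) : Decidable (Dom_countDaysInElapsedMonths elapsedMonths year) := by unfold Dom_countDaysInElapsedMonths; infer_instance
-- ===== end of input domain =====

-- B replaces A's per-index loop by a closed form: 31 days per elapsed month minus the
-- shortfall of the shorter months already elapsed — O(1) instead of O(n).

-- ===== PORT A =====
def isLeapYear (year : Int) : Bool :=
  if PySem.Int.mod year 4 == 0 then
    if PySem.Int.mod year 100 == 0 then
      if PySem.Int.mod year 400 == 0 then true else false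
    else true
  else false

def countDaysInElapsedMonths (elapsedMonths : Int) (year : Int) : Int :=
  (PySem.List.pyRange 0 elapsedMonths 1).foldl (fun count i =>
    if i == 1 then
      if isLeapYear year then count + 29 else count + 28
    else if ([3, 5, 8, 10] : List Int).contains i then count + 30
    else count + 31) 0

-- ===== PORT B =====
def countDaysInElapsedMonths_alt (elapsedMonths : Int) (year : Int) : Int :=
  if elapsedMonths ≤ 0 then 0
  else
    let short30 : Int := (([3, 5, 8, 10] : List Int).filter (fun i => i < elapsedMonths)).length
    let feb : Int := if 2 ≤ elapsedMonths then (if isLeapYear year then 2 else 3) else 0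
    31 * elapsedMonths - short30 - feb

-- ===== PRECONDITION & SPEC =====
def Spec_countDaysInElapsedMonths (elapsedMonths : Int) (year : Int) (out : Int) : Prop := out = countDaysInElapsedMonths_alt elapsedMonths year
instance (elapsedMonths : Int) (year : Int) (out : Int) : Decidable (Spec_countDaysInElapsedMonths elapsedMonths year out) := by unfold Spec_countDaysInElapsedMonths; infer_instance

-- ===== CLAIM (what is proved, stated in full; the proofs are below) =====
def Claim_equal_countDaysInElapsedMonths : Prop := ∀ (elapsedMonths : Int) (year : Int), Dom_countDaysInElapsedMonths elapsedMonths year → Spec_countDaysInElapsedMonths elapsedMonths year (countDaysInElapsedMonths elapsedMonths year)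

-- ===== LEMMAS AND PROOFS =====

/-- Per-month contribution of A's loop body. -/
def pvG (year : Int) (i : Int) : Int :=
  if i == 1 then (if isLeapYear year then 29 else 28)
  else if ([3, 5, 8, 10] : List Int).contains i then 30
  else 31

/-- B's total, without the nonpositive guard (it is 0 at n = 0 anyway). -/
def pvF (year : Int) (n : Int) : Int :=
  31 * n - (([3, 5, 8, 10] : List Int).filter (fun i => i < n)).length
    - (if 2 ≤ n then (if isLeapYear year then 2 else 3) else 0)

lemma pvFoldA (year : Int) (l : List Int) (c : Int) :
    l.foldl (fun count i =>
      if i == 1 then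
        if isLeapYear year then count + 29 else count + 28
      else if ([3, 5, 8, 10] : List Int).contains i then count + 30
      else count + 31) c = c + (l.map (pvG year)).sum := by
  induction l generalizing c with
  | nil => simp
  | cons a t ih =>
    simp only [List.foldl_cons, List.map_cons, List.sum_cons, ih, pvG]
    split_ifs <;> ring

lemma pvStep (year : Int) (k : Int) (hk : 0 ≤ k) :
    pvF year (k + 1) = pvF year k + pvG year k := by
  by_cases h11 : k < 11
  · interval_cases k <;>
      cases hL : isLeapYear year <;>
        simp [pvF, pvG, hL, List.filter]
  · have e1 : ([3, 5, 8, 10] : List Int).filter (fun i => i < k) = [3, 5, 8, 10] := by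
      rw [List.filter_eq_self]
      intro a ha
      simp only [List.mem_cons, List.not_mem_nil, or_false] at ha
      simp only [decide_eq_true_eq]
      omega
    have e2 : ([3, 5, 8, 10] : List Int).filter (fun i => i < k + 1) = [3, 5, 8, 10] := by
      rw [List.filter_eq_self]
      intro a ha
      simp only [List.mem_cons, List.not_mem_nil, or_false] at ha
      simp only [decide_eq_true_eq]
      omega
    have hg : pvG year k = 31 := by
      unfold pvG
      rw [if_neg (by simp only [beq_iff_eq]; omega),
        if_neg (by
          simp only [List.contains_eq_mem, List.mem_cons, List.not_mem_nil, or_false,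
            decide_eq_true_eq, not_or]
          omega)]
    unfold pvF
    rw [e1, e2, hg, if_pos (by omega : (2:Int) ≤ k + 1), if_pos (by omega : (2:Int) ≤ k)]
    split_ifs <;> simp <;> ring

lemma pvSum (year : Int) (m : Nat) :
    ((PySem.List.pyRange 0 (m : Int) 1).map (pvG year)).sum = pvF year (m : Int) := by
  induction m with
  | zero =>
    rw [PySem.List.pyRange_one_eq_nil (by norm_num)]
    unfold pvF
    norm_num
  | succ k ih =>
    have hrange : PySem.List.pyRange 0 ((k : Int) + 1) 1
        = PySem.List.pyRange 0 (k : Int) 1 ++ [(k : Int)] :=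
      PySem.List.pyRange_one_succ_right (by positivity)
    rw [show (((k + 1 : Nat)) : Int) = (k : Int) + 1 by push_cast; ring,
      hrange, List.map_append, List.sum_append, ih,
      pvStep year (k : Int) (by positivity)]
    simp

-- ===== VERDICT (by name: the statement is the Claim_ definition above) =====
theorem countDaysInElapsedMonths_spec : Claim_equal_countDaysInElapsedMonths := by
  intro n year _
  unfold Spec_countDaysInElapsedMonths countDaysInElapsedMonths countDaysInElapsedMonths_alt
  rw [pvFoldA, zero_add]
  by_cases hn : n ≤ 0
  · rw [PySem.List.pyRange_one_eq_nil hn, if_pos hn]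
    simp
  · rw [if_neg hn]
    push Not at hn
    obtain ⟨m, rfl⟩ : ∃ m : Nat, n = (m : Int) :=
      ⟨n.toNat, (Int.toNat_of_nonneg hn.le).symm⟩
    rw [pvSum]
    unfold pvF
    ring
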